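-- pv_equiv track=rewrite | github.com/zyscal/PycharmProjects | pythonProject/BC26_20211107_REG_RTT_TCP/20211107_REG_TCP_RTT_diff.py | split_datetimes_by_datetime
-- ===== SOURCE A (Python) =====
-- def split_datetimes_by_datetime(lista, listb) :
--     lists = []
--     for i in lista :
--         min = i[0]
--         max = i[len(i) - 1]
--         temlist = []
--         for j in listb:
--             if j >= min and j <= max :
--                 temlist.append(j)
--         lists.append(temlist)
--     return lists
-- ===== SOURCE B (Python) =====
-- def split_datetimes_by_datetime(lista, listb):
--     # Alternative strategy: sort listb's indices by value once, then answer each interval by binary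
--     # search for the [lo, hi] range; re-sorting the hit indices restores the
--     # original listb order, so each bucket equals A's filter result exactly.
--     n = len(listb)
--     order = sorted(range(n), key=lambda k: listb[k])
--     keys = [listb[k] for k in order]
--
--     def bisect_left(x, lo, hi):
--         if lo >= hi:
--             return lo
--         mid = (lo + hi) // 2
--         if keys[mid] < x:
--             return bisect_left(x, mid + 1, hi)
--         return bisect_left(x, lo, mid)
--
--     def bisect_right(x, lo, hi):
--         if lo >= hi:
--             return lo
--         mid = (lo + hi) // 2
--         if keys[mid] <= x:
--             return bisect_right(x, mid + 1, hi)
--         return bisect_right(x, lo, mid)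
--
--     out = []
--     for i in lista:
--         lo, hi = i[0], i[-1]
--         bl = bisect_left(lo, 0, n)
--         br = bisect_right(hi, 0, n)
--         out.append([listb[k] for k in sorted(order[bl:br])])
--     return out
-- ===== Notes on version B (the rewrite author's own statement) =====
-- stated objective: alternative
-- what changed: B sorts listb's indices by value once and answers each interval with two binary searches (bisect) on the sorted keys, re-sorting the hit indices to restore listb order, instead of rescanning all of listb per interval.
import Mathlib
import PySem

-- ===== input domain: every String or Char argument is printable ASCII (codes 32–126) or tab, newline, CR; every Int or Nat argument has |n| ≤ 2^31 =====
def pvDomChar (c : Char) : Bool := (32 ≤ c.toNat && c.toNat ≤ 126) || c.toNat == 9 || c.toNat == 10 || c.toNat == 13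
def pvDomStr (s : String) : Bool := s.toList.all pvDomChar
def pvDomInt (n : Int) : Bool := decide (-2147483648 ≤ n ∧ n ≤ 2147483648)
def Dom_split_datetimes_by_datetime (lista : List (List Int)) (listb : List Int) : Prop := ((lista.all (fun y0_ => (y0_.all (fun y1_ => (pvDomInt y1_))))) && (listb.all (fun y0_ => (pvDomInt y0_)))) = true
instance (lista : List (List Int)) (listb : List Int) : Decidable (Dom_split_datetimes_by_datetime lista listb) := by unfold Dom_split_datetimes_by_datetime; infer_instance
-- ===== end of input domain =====

-- B sorts listb's indices by value once and answers each interval by two binary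
-- searches (bisect) on the sorted keys, re-sorting the hit indices to restore
-- listb's original order, instead of rescanning all of listb for every interval
-- (objective: alternative).

-- ===== PORT A =====
def split_datetimes_by_datetime (lista : List (List Int)) (listb : List Int) : List (List Int) :=
  lista.foldl (fun lists i =>
    let mn := (PySem.List.pyGet? i 0).getD 0
    let mx := (PySem.List.pyGet? i ((i.length : Int) - 1)).getD 0
    let temlist := listb.foldl (fun t j => if j ≥ mn ∧ j ≤ mx then t ++ [j] else t) []
    lists ++ [temlist]) []

-- ===== PORT B =====
-- Source B's hand-written recursive bisect_left/bisect_right over `keys` compute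
-- exactly Python's bisect partition points; ported as PySem.List.bisectLeft /
-- bisectRight (the prelude's primitive for that algorithm).
def split_datetimes_by_datetime_alt (lista : List (List Int)) (listb : List Int) : List (List Int) :=
  let n := PySem.List.len listb
  let order := PySem.List.sorted (PySem.List.pyRange 0 n) (fun k => (PySem.List.pyGet? listb k).getD 0)
  let keys := order.map (fun k => (PySem.List.pyGet? listb k).getD 0)
  lista.foldl (fun out i =>
    let lo := (PySem.List.pyGet? i 0).getD 0
    let hi := (PySem.List.pyGet? i (-1)).getD 0
    let bl := PySem.List.bisectLeft keys lo
    let br := PySem.List.bisectRight keys hi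
    out ++ [(PySem.List.sorted (PySem.List.slice order (some (bl : Int)) (some (br : Int))) (fun k => k)).map
      (fun k => (PySem.List.pyGet? listb k).getD 0)]) []

-- ===== PRECONDITION & SPEC =====
-- Pre_ excludes inputs where some interval list in lista is empty: there the
-- Python A raises IndexError on i[0] (and so does B).
def Pre_split_datetimes_by_datetime (lista : List (List Int)) (listb : List Int) : Prop :=
  (lista.all (fun i => !i.isEmpty)) = true
instance (lista : List (List Int)) (listb : List Int) : Decidable (Pre_split_datetimes_by_datetime lista listb) := by unfold Pre_split_datetimes_by_datetime; infer_instance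
def pvWitness_split_datetimes_by_datetime : List (List Int) × List Int := ([[1, 5], [3, 7, 9]], [2, 4, 8, 1])

def Spec_split_datetimes_by_datetime (lista : List (List Int)) (listb : List Int) (out : List (List Int)) : Prop := out = split_datetimes_by_datetime_alt lista listb
instance (lista : List (List Int)) (listb : List Int) (out : List (List Int)) : Decidable (Spec_split_datetimes_by_datetime lista listb out) := by unfold Spec_split_datetimes_by_datetime; infer_instance

-- ===== CLAIM (what is proved, stated in full; the proofs are below) =====
def Claim_equal_split_datetimes_by_datetime : Prop := ∀ (lista : List (List Int)) (listb : List Int), Dom_split_datetimes_by_datetime lista listb → Pre_split_datetimes_by_datetime lista listb → Spec_split_datetimes_by_datetime lista listb (split_datetimes_by_datetime lista listb)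

-- ===== LEMMAS AND PROOFS =====

-- A slice [bl, br) of a list whose predicate holds exactly on positions bl ≤ j < br is that list's filter.
theorem pv_slice_filter {α : Type} (l : List α) (p : α → Bool) (bl br : Nat) (hbr : br ≤ l.length)
    (h1 : ∀ (j : Nat) (hj : j < l.length), j < bl → p l[j] = false)
    (h2 : ∀ (j : Nat) (hj : j < l.length), bl ≤ j → j < br → p l[j] = true)
    (h3 : ∀ (j : Nat) (hj : j < l.length), br ≤ j → p l[j] = false) :
    (l.drop bl).take (br - bl) = l.filter p := by
  by_cases hble : bl ≤ br
  · have hsplit : (l.drop bl).take (br - bl) ++ l.drop br = l.drop bl := by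
      have hd : (l.drop bl).drop (br - bl) = l.drop br := by
        rw [List.drop_drop]; congr 1; omega
      rw [← hd, List.take_append_drop]
    have hfilterA : (l.take bl).filter p = [] := by
      rw [List.filter_eq_nil_iff]
      intro a ha
      rcases List.mem_take_iff_getElem.mp ha with ⟨j, hm, rfl⟩
      simp [h1 j (by omega) (by omega)]
    have hfilterM : ((l.drop bl).take (br - bl)).filter p = (l.drop bl).take (br - bl) := by
      rw [List.filter_eq_self]
      intro a ha
      rcases List.mem_take_iff_getElem.mp ha with ⟨i, hm, rfl⟩
      have hlen : (l.drop bl).length = l.length - bl := List.length_drop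
      have hi1 : i < br - bl := by omega
      have hi2 : bl + i < l.length := by omega
      have : (l.drop bl)[i] = l[bl + i] := List.getElem_drop
      rw [this]
      exact h2 (bl + i) hi2 (by omega) (by omega)
    have hfilterC : (l.drop br).filter p = [] := by
      rw [List.filter_eq_nil_iff]
      intro a ha
      rcases List.mem_drop_iff_getElem.mp ha with ⟨j, hm, rfl⟩
      simp [h3 (br + j) (by omega) (by omega)]
    conv_rhs => rw [← List.take_append_drop bl l, ← hsplit]
    rw [List.filter_append, List.filter_append, hfilterA, hfilterM, hfilterC]
    simp
  · have hmid : (l.drop bl).take (br - bl) = [] := by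
      have : br - bl = 0 := by omega
      simp [this]
    have : l.filter p = [] := by
      rw [List.filter_eq_nil_iff]
      intro a ha
      rcases List.mem_iff_getElem.mp ha with ⟨j, hj, rfl⟩
      by_cases hjb : j < bl
      · simp [h1 j hj hjb]
      · simp [h3 j hj (by omega)]
    rw [hmid, this]

-- (range n).map ↑· mapped through j ↦ listb[j] is listb itself.
theorem pv_map_range_getD (listb : List Int) :
    (List.range listb.length).map (fun j => (listb[j]?.getD 0)) = listb := by
  apply List.ext_getElem
  · simp
  · intro i h1 h2
    simp only [List.getElem_map, List.getElem_range]
    rw [List.getElem?_eq_getElem h2]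
    rfl

-- One bucket of B equals A's filter of listb.
theorem pv_bucket (listb : List Int) (lo hi : Int) :
    (PySem.List.sorted
        (PySem.List.slice
          (PySem.List.sorted (PySem.List.pyRange 0 (PySem.List.len listb)) (fun k => (PySem.List.pyGet? listb k).getD 0))
          (some ((PySem.List.bisectLeft
              ((PySem.List.sorted (PySem.List.pyRange 0 (PySem.List.len listb)) (fun k => (PySem.List.pyGet? listb k).getD 0)).map
               (fun k => (PySem.List.pyGet? listb k).getD 0)) lo : Nat) : Int))
          (some ((PySem.List.bisectRight
              ((PySem.List.sorted (PySem.List.pyRange 0 (PySem.List.len listb)) (fun k => (PySem.List.pyGet? listb k).getD 0)).map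
               (fun k => (PySem.List.pyGet? listb k).getD 0)) hi : Nat) : Int)))
        (fun k => k)).map (fun k => (PySem.List.pyGet? listb k).getD 0)
      = listb.filter (fun j => decide (lo ≤ j ∧ j ≤ hi)) := by
  set f : Int → Int := fun k => (PySem.List.pyGet? listb k).getD 0 with hf
  set n := listb.length with hn
  set R : List Int := PySem.List.pyRange 0 (n : Int) with hR
  have hRmap : R = (List.range n).map (fun (k : Nat) => (k : Int)) := PySem.List.pyRange_zero_natCast n
  have hlen : PySem.List.len listb = (n : Int) := by simp [PySem.List.len, hn]
  have hrange : PySem.List.pyRange 0 (PySem.List.len listb) = R := by rw [hlen]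
  set order := PySem.List.sorted (PySem.List.pyRange 0 (PySem.List.len listb)) f with horder
  set keys := order.map f with hkeys
  set bl := PySem.List.bisectLeft keys lo with hbl
  set br := PySem.List.bisectRight keys hi with hbr
  set p : Int → Bool := fun k => decide (lo ≤ f k ∧ f k ≤ hi) with hp
  -- keys is nondecreasing
  have hordpair : List.Pairwise (fun a b => f a ≤ f b) order := by
    rw [horder]; exact PySem.List.sorted_pairwise _ f
  have hkeyspair : List.Pairwise (· ≤ ·) keys := by
    rw [hkeys]; exact List.pairwise_map.mpr hordpair
  have hkeyslen : keys.length = order.length := by simp [hkeys]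
  obtain ⟨hblle, hbllt, hblge⟩ := PySem.List.bisectLeft_spec keys lo hkeyspair
  obtain ⟨hbrle, hbrlt, hbrge⟩ := PySem.List.bisectRight_spec keys hi hkeyspair
  have hkey_at : ∀ (j : Nat) (hj : j < order.length), keys[j]'(by omega) = f (order[j]) := by
    intro j hj; simp [hkeys]
  -- the slice is the filter of order
  have hslice : PySem.List.slice order (some (bl : Int)) (some (br : Int)) = order.filter p := by
    rw [PySem.List.slice_natCast]
    apply pv_slice_filter order p bl br (by omega)
    · intro j hj hjbl
      have := hbllt j (by omega) hjbl
      rw [hkey_at j hj] at this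
      simp [hp]; intro h; omega
    · intro j hj h1 h2
      have ha := hblge j (by omega) h1
      have hb := hbrlt j (by omega) h2
      rw [hkey_at j hj] at ha hb
      simp [hp]; exact ⟨ha, hb⟩
    · intro j hj hjbr
      have := hbrge j (by omega) hjbr
      rw [hkey_at j hj] at this
      simp [hp]; intro h; omega
  -- sorting the filtered indices gives the canonical ascending index list
  have hperm : order.Perm R := by rw [horder, hrange]; exact PySem.List.sorted_perm _ _ _
  have hRpair : List.Pairwise (fun a b : Int => a < b) R := by
    rw [hRmap]
    exact List.pairwise_map.mpr (List.pairwise_lt_range.imp (fun h => Nat.cast_lt.mpr h))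
  have hsorted : PySem.List.sorted (order.filter p) (fun k => k) = R.filter p := by
    apply PySem.List.sorted_eq_of_perm_of_pairwise_lt
    · exact (hperm.symm).filter p
    · exact List.Pairwise.sublist List.filter_sublist hRpair
  rw [hslice, hsorted, hRmap]
  -- map the ascending indices back to values
  have hcomp : ∀ j : Nat, f ((j : Int)) = listb[j]?.getD 0 := by
    intro j; simp [hf, PySem.List.pyGet?_natCast]
  rw [List.filter_map, List.map_map]
  have hpredeq : ((List.range n).filter (p ∘ fun j : Nat => (j : Int))).map ((fun k => f k) ∘ fun j : Nat => (j : Int))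
      = ((List.range n).filter ((fun j => decide (lo ≤ j ∧ j ≤ hi)) ∘ fun j : Nat => listb[j]?.getD 0)).map
          ((fun j : Nat => listb[j]?.getD 0)) := by
    have h1 : (p ∘ fun j : Nat => (j : Int)) = ((fun j => decide (lo ≤ j ∧ j ≤ hi)) ∘ fun j : Nat => listb[j]?.getD 0) := by
      funext j; simp [hp, Function.comp, hcomp j]
    rw [h1]
    apply List.map_congr_left
    intro j hj
    simp [Function.comp, hcomp j]
  rw [hpredeq, ← List.filter_map, pv_map_range_getD]

-- For a nonempty list, index (len - 1) and index -1 fetch the same element.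
theorem pv_last_idx (i : List Int) (h : i ≠ []) :
    PySem.List.pyGet? i ((i.length : Int) - 1) = PySem.List.pyGet? i (-1) := by
  have hlen : 0 < i.length := List.length_pos_iff.mpr h
  have hc : ((i.length : Int) - 1) = ((i.length - 1 : Nat) : Int) := by push_cast [hlen]; ring
  rw [hc, PySem.List.pyGet?_natCast, PySem.List.pyGet?_neg_one]
  exact List.getLast?_eq_getElem?.symm

-- ===== VERDICT (by name: the statement is the Claim_ definition above) =====
theorem split_datetimes_by_datetime_spec : Claim_equal_split_datetimes_by_datetime := by
  intro lista listb _ hpre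
  have hne : ∀ i ∈ lista, i ≠ [] := by
    intro i hi
    have := List.all_eq_true.mp hpre i hi
    simpa using this
  unfold Spec_split_datetimes_by_datetime split_datetimes_by_datetime split_datetimes_by_datetime_alt
  simp only []
  rw [PySem.List.foldl_append_singleton_eq_map, PySem.List.foldl_append_singleton_eq_map]
  simp only [List.nil_append]
  apply List.map_congr_left
  intro i hi
  rw [PySem.List.foldl_append_ite_eq_filter]
  simp only [List.nil_append]
  rw [pv_last_idx i (hne i hi)]
  rw [pv_bucket listb ((PySem.List.pyGet? i 0).getD 0) ((PySem.List.pyGet? i (-1)).getD 0)]
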